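-- pv_equiv track=rewrite | github.com/AverageComet250/cipher-challenge | Kasiski-Friedman_Vigenere_Solver.py | kasiski_distances
-- ===== SOURCE A (Python) =====
-- def kasiski_distances(text: str, n: int = 3):
--     """Find distances between repeated n-grams (for Kasiski examination)."""
--     positions = {}
--     for i in range(len(text) - n + 1):
--         chunk = text[i:i+n]
--         positions.setdefault(chunk, []).append(i)
--     dists = []
--     for pos in positions.values():
--         for a, b in zip(pos, pos[1:]):
--             dists.append(b - a)
--     return dists
-- ===== SOURCE B (Python) =====
-- def kasiski_distances(text: str, n: int = 3):
--     """Find distances between repeated n-grams (for Kasiski examination)."""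
--     dists = []
--     for i in range(len(text) - n + 1):
--         g = text[i:i+n]
--         if any(text[j:j+n] == g for j in range(i)):
--             continue  # g already handled at its first occurrence
--         prev = i
--         for j in range(i + 1, len(text) - n + 1):
--             if text[j:j+n] == g:
--                 dists.append(j - prev)
--                 prev = j
--     return dists
-- ===== Notes on version B (the rewrite author's own statement) =====
-- stated objective: alternative
-- what changed: B drops A's dict-of-position-lists entirely: it does a brute-force nested scan, and only at the first occurrence of each n-gram rescans the remainder of the text for that n-gram's later occurrences, emitting each gap as found; A groups all positions per n-gram in a dict and zips each list with its tail afterwards.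
import Mathlib
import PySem

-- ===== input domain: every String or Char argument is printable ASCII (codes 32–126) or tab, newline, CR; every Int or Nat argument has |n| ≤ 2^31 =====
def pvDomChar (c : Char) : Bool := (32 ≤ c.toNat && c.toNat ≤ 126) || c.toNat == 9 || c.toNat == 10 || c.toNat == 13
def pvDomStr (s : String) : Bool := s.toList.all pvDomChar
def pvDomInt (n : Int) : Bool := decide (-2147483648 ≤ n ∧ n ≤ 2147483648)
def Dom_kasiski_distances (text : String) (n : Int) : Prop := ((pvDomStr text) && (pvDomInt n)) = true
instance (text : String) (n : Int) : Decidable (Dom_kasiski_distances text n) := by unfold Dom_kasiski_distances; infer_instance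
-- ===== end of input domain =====

-- B replaces A's dict-of-position-lists by a dictionary-free brute-force nested scan:
-- at the first occurrence of each n-gram it rescans the rest of the text for later
-- occurrences and emits each gap as found (objective: alternative; not faster).

-- ===== PORT A =====
def kasiski_distances (text : String) (n : Int) : List Int :=
  let cs := text.toList
  let positions :=
    (PySem.List.pyRange 0 ((cs.length : Int) - n + 1) 1).foldl
      (fun d i => d.modify (PySem.List.slice cs (some i) (some (i + n))) [] (fun l => l ++ [i]))
      PySem.Dict.empty
  positions.values.foldl
    (fun dists pos =>
      (pos.zip (PySem.List.slice pos (some 1) none)).foldl (fun ds ab => ds ++ [ab.2 - ab.1]) dists)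
    []

-- ===== PORT B =====
def kasiski_distances_alt (text : String) (n : Int) : List Int :=
  let cs := text.toList
  let L : Int := (cs.length : Int) - n + 1
  (PySem.List.pyRange 0 L 1).foldl
    (fun dists i =>
      let g := PySem.List.slice cs (some i) (some (i + n))
      if (PySem.List.pyRange 0 i 1).any
          (fun j => PySem.List.slice cs (some j) (some (j + n)) == g) then
        dists  -- 'continue': g already handled at its first occurrence
      else
        ((PySem.List.pyRange (i + 1) L 1).foldl
          (fun (st : List Int × Int) j =>
            if PySem.List.slice cs (some j) (some (j + n)) == g then
              (st.1 ++ [j - st.2], j)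
            else st)
          (dists, i)).1)
    []

-- ===== PRECONDITION & SPEC =====
def Spec_kasiski_distances (text : String) (n : Int) (out : List Int) : Prop := out = kasiski_distances_alt text n
instance (text : String) (n : Int) (out : List Int) : Decidable (Spec_kasiski_distances text n out) := by unfold Spec_kasiski_distances; infer_instance

-- ===== CLAIM (what is proved, stated in full; the proofs are below) =====
def Claim_equal_kasiski_distances : Prop := ∀ (text : String) (n : Int), Dom_kasiski_distances text n → Spec_kasiski_distances text n (kasiski_distances text n)

-- ===== LEMMAS AND PROOFS =====

/-- Consecutive differences of a list (what zip(pos, pos[1:]) computes in A, and what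
    B's inner rescan emits with `prev` threaded through). -/
def zdiffs : List Int → List Int
  | a :: b :: t => (b - a) :: zdiffs (b :: t)
  | _ => []

theorem zdiffs_eq_zip_tail (P : List Int) :
    (P.zip P.tail).map (fun ab => ab.2 - ab.1) = zdiffs P := by
  induction P with
  | nil => rfl
  | cons a t ih =>
    cases t with
    | nil => rfl
    | cons b t' => simp [zdiffs, List.zip, ← ih]

/-- A's grouping dict at key k is exactly the filtered index list. -/
theorem foldA_getD {κ : Type} [BEq κ] [LawfulBEq κ] (c : Int → κ) (idxs : List Int) (k : κ) :
    (idxs.foldl (fun d i => d.modify (c i) [] (fun l => l ++ [i])) PySem.Dict.empty).getD k []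
    = idxs.filter (fun i => c i == k) := by
  have h1 : idxs.foldl (fun d i => d.modify (c i) [] (fun l => l ++ [i])) PySem.Dict.empty
      = (idxs.map (fun i => (c i, i))).foldl (fun d p => d.modify p.1 [] (fun l => l ++ [p.2])) PySem.Dict.empty := by
    rw [List.foldl_map]
  rw [h1, PySem.Dict.getD_foldl_modify_append]
  simp [PySem.Dict.getD_empty, List.filter_map, Function.comp_def, List.map_map]

/-- B's inner rescan loop: starting from accumulator `acc` and last position `prev`,
    it appends the consecutive differences of `prev ::` the matching positions. -/
theorem innerB (p : Int → Bool) (l : List Int) (acc : List Int) (prev : Int) :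
    (l.foldl (fun (st : List Int × Int) j => if p j then (st.1 ++ [j - st.2], j) else st)
      (acc, prev)).1
    = acc ++ zdiffs (prev :: l.filter p) := by
  induction l generalizing acc prev with
  | nil => simp [zdiffs]
  | cons j t ih =>
    by_cases h : p j
    · rw [List.foldl_cons, if_pos h, ih, List.filter_cons_of_pos h]
      simp [zdiffs]
    · rw [List.foldl_cons, if_neg h, ih, List.filter_cons_of_neg h]

/-- Pointwise-on-members congruence for `List.any`. -/
theorem any_congr_mem {α : Type} (l : List α) (f g : α → Bool)
    (h : ∀ a ∈ l, f a = g a) : l.any f = l.any g := by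
  induction l with
  | nil => rfl
  | cons x t ih => simp [h x (by simp), ih (fun a ha => h a (List.mem_cons_of_mem _ ha))]

/-- Dropping elements whose image under `f` is empty does not change a flatMap. -/
theorem flatMap_filter_of_nil {α β : Type} (l : List α) (p : α → Bool) (f : α → List β)
    (h : ∀ a ∈ l, p a = false → f a = []) :
    l.flatMap f = (l.filter p).flatMap f := by
  induction l with
  | nil => rfl
  | cons x t ih =>
    by_cases hx : p x
    · simp only [List.flatMap_cons, List.filter_cons_of_pos hx, List.flatMap_cons]
      rw [ih (fun a ha => h a (List.mem_cons_of_mem _ ha))]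
    · have hx' : p x = false := by simpa using hx
      simp only [List.flatMap_cons, List.filter_cons_of_neg hx,
        h x List.mem_cons_self hx', List.nil_append]
      exact ih (fun a ha => h a (List.mem_cons_of_mem _ ha))

/-- Elements already present (here: equal to `a ∈ s`) are never added by the set fold. -/
theorem foldl_add_filter {κ : Type} [BEq κ] [LawfulBEq κ] (a : κ) (l : List κ)
    (s : PySem.Set κ) (ha : a ∈ s) :
    l.foldl PySem.Set.add s = (l.filter (fun x => !(x == a))).foldl PySem.Set.add s := by
  induction l generalizing s with
  | nil => rfl
  | cons x t ih =>
    by_cases hx : x == a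
    · have hxa : x = a := by simpa using hx
      subst hxa
      have hadd : PySem.Set.add s x = s := by simp [PySem.Set.add, ha]
      rw [List.foldl_cons, hadd, List.filter_cons_of_neg (by simp)]
      exact ih s ha
    · have hx' : List.filter (fun y => !(y == a)) (x :: t)
          = x :: List.filter (fun y => !(y == a)) t := by
        simp [hx]
      rw [List.foldl_cons, hx', List.foldl_cons]
      exact ih _ ((PySem.Set.mem_add _ _ _).mpr (Or.inl ha))

/-- Folding `Set.add` over elements none of which equals the set's head keeps the head. -/
theorem cons_foldl_add {κ : Type} [BEq κ] [LawfulBEq κ] (a : κ) (m : List κ)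
    (hm : ∀ x ∈ m, (x == a) = false) : ∀ s : PySem.Set κ,
    m.foldl PySem.Set.add (a :: s) = a :: m.foldl PySem.Set.add s := by
  induction m with
  | nil => intro s; rfl
  | cons x t ih =>
    intro s
    have hxa : x ≠ a := by
      have := hm x List.mem_cons_self; simpa using this
    have hstep : PySem.Set.add (a :: s) x = a :: PySem.Set.add s x := by
      by_cases hs : x ∈ s
      · simp [PySem.Set.add, hs, hxa]
      · simp [PySem.Set.add, hs, hxa]
    simp only [List.foldl_cons, hstep]
    exact ih (fun y hy => hm y (List.mem_cons_of_mem _ hy)) _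

/-- Peeling the first element of set(xs): the head, then the set of the rest with
    all copies of the head removed. -/
theorem ofList_cons_filter {κ : Type} [BEq κ] [LawfulBEq κ] (a : κ) (l : List κ) :
    PySem.Set.ofList (a :: l)
      = a :: PySem.Set.ofList (l.filter (fun x => !(x == a))) := by
  have h0 : PySem.Set.ofList (a :: l) = l.foldl PySem.Set.add [a] := by
    rw [PySem.Set.ofList_eq_foldl, List.foldl_cons]
    congr 1
  rw [h0, foldl_add_filter a l [a] (by simp), PySem.Set.ofList_eq_foldl,
    show ([a] : PySem.Set κ) = a :: ([] : PySem.Set κ) from rfl]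
  exact cons_foldl_add a _ (fun x hx => by simpa using (List.of_mem_filter hx)) []

/-- The heart of the equivalence: on a strictly increasing index list, scanning from each
    first occurrence for its later matches (B) produces the same flattened list of
    per-group consecutive differences as grouping all positions by key (A). -/
theorem mainB {κ : Type} [BEq κ] [LawfulBEq κ] (c : Int → κ) :
    ∀ (N : Nat) (xs : List Int), xs.length ≤ N → xs.Pairwise (· < ·) →
    xs.flatMap (fun i => if xs.any (fun j => decide (j < i) && (c j == c i)) then []
                          else zdiffs (xs.filter (fun j => c j == c i)))
    = ((PySem.Set.ofList (xs.map c)).map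
        (fun k => zdiffs (xs.filter (fun j => c j == k)))).flatten := by
  intro N
  induction N with
  | zero =>
    intro xs hlen _
    have : xs = [] := List.eq_nil_of_length_eq_zero (Nat.le_zero.mp hlen)
    subst this; rfl
  | succ N ih =>
    intro xs hlen hp
    cases xs with
    | nil => rfl
    | cons x t =>
      have hlt : ∀ j ∈ t, x < j := fun j hj => List.rel_of_pairwise_cons hp hj
      have hpt : t.Pairwise (· < ·) := hp.of_cons
      set t' := t.filter (fun j => !(c j == c x)) with ht'
      -- the head is a first occurrence
      have hhead : ((x :: t).any fun j => decide (j < x) && (c j == c x)) = false := by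
        rw [List.any_eq_false]
        intro j hj
        rcases List.mem_cons.mp hj with rfl | hj'
        · simp
        · simp [not_lt.mpr (le_of_lt (hlt j hj'))]
      -- the group of any key other than c x is untouched by removing the head's group
      have hgroup : ∀ k : κ, (c x == k) = false →
          (x :: t).filter (fun j => c j == k) = t'.filter (fun j => c j == k) := by
        intro k hk
        rw [List.filter_cons_of_neg (by simpa using hk), ht', List.filter_filter]
        refine (List.filter_congr ?_).symm
        intro j _
        by_cases hj : c j == k
        · have : c j = k := by simpa using hj
          have : (c j == c x) = false := by
            rw [this]
            rw [beq_eq_false_iff_ne] at hk ⊢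
            exact fun h => hk h.symm
          simp [hj, this]
        · simp [hj]
      -- the first-occurrence test of any key other than c x is likewise untouched
      have hany : ∀ i : Int, (c x == c i) = false →
          ((x :: t).any fun j => decide (j < i) && (c j == c i))
            = t'.any fun j => decide (j < i) && (c j == c i) := by
        intro i hi
        rw [List.any_cons, ht', List.any_filter]
        have hx0 : (decide (x < i) && (c x == c i)) = false := by simp [hi]
        rw [hx0, Bool.false_or]
        refine any_congr_mem t _ _ ?_
        intro j _
        by_cases hj : c j == c i
        · have hje : c j = c i := by simpa using hj
          have : (c j == c x) = false := by
            rw [hje]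
            rw [beq_eq_false_iff_ne] at hi ⊢
            exact fun h => hi h.symm
          simp [hj, this]
        · simp [hj]
      -- left side: head emits its whole group, later group members emit nothing
      rw [List.flatMap_cons, hhead, if_neg (by simp)]
      have hdrop : t.flatMap (fun i => if (x :: t).any (fun j => decide (j < i) && (c j == c i)) then []
            else zdiffs ((x :: t).filter (fun j => c j == c i)))
          = t'.flatMap (fun i => if t'.any (fun j => decide (j < i) && (c j == c i)) then []
            else zdiffs (t'.filter (fun j => c j == c i))) := by
        have hnil : ∀ i ∈ t, (!(c i == c x)) = false →
            (if (x :: t).any (fun j => decide (j < i) && (c j == c i)) then []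
              else zdiffs ((x :: t).filter (fun j => c j == c i))) = ([] : List Int) := by
          intro i hit hfalse
          have himem : (c i == c x) = true := by simpa using hfalse
          have hT : ((x :: t).any fun j => decide (j < i) && (c j == c i)) = true := by
            rw [List.any_eq_true]
            refine ⟨x, List.mem_cons_self, ?_⟩
            have : (c x == c i) = true := by
              have := eq_of_beq himem; simp [this]
            simp [hlt i hit, this]
          rw [hT, if_pos rfl]
        rw [flatMap_filter_of_nil t (fun j => !(c j == c x)) _ hnil]
        refine List.flatMap_congr ?_
        intro i hi
        have hi' : (c i == c x) = false := by
          have := List.of_mem_filter hi; simpa using this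
        have hi'' : (c x == c i) = false := by
          rw [beq_eq_false_iff_ne] at hi' ⊢; exact fun h => hi' h.symm
        rw [hany i hi'', hgroup (c i) hi'']
      rw [hdrop]
      -- right side: peel the head key off the set
      have hsets : PySem.Set.ofList ((x :: t).map c)
          = c x :: PySem.Set.ofList (t'.map c) := by
        rw [List.map_cons, ofList_cons_filter, ht', List.filter_map]
        rfl
      rw [hsets, List.map_cons, List.flatten_cons]
      -- tail keys: groups over x::t agree with groups over t'
      have htail : (PySem.Set.ofList (t'.map c)).map
            (fun k => zdiffs ((x :: t).filter fun j => c j == k))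
          = (PySem.Set.ofList (t'.map c)).map
            (fun k => zdiffs (t'.filter fun j => c j == k)) := by
        refine List.map_congr_left ?_
        intro k hk
        have hk1 : k ∈ t'.map c := (PySem.Set.mem_ofList _ _).mp hk
        obtain ⟨j, hj, rfl⟩ := List.mem_map.mp hk1
        have hj' : (c j == c x) = false := by
          have := List.of_mem_filter hj; simpa using this
        have hxk : (c x == c j) = false := by
          rw [beq_eq_false_iff_ne] at hj' ⊢; exact fun h => hj' h.symm
        rw [hgroup (c j) hxk]
      -- induction hypothesis on t'
      have hlen' : t'.length ≤ N := by
        have h1 : t'.length ≤ t.length := List.length_filter_le _ _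
        have h2 : t.length ≤ N := by simpa using Nat.succ_le_succ_iff.mp (by simpa using hlen)
        omega
      rw [htail, ih t' hlen' (hpt.filter _)]

/-- Intrinsic form of B's per-position contribution, over the full index list. -/
theorem FbF {κ : Type} [BEq κ] [LawfulBEq κ] (c : Int → κ) (L i : Int)
    (hi : i ∈ PySem.List.pyRange 0 L 1) :
    (if (PySem.List.pyRange 0 i 1).any (fun j => c j == c i) then []
      else zdiffs (i :: (PySem.List.pyRange (i + 1) L 1).filter (fun j => c j == c i)))
    = (if (PySem.List.pyRange 0 L 1).any (fun j => decide (j < i) && (c j == c i)) then []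
      else zdiffs ((PySem.List.pyRange 0 L 1).filter (fun j => c j == c i))) := by
  obtain ⟨h0i, hiL⟩ := (PySem.List.mem_pyRange_one).mp hi
  have hsplit : PySem.List.pyRange 0 L 1
      = PySem.List.pyRange 0 i 1 ++ i :: PySem.List.pyRange (i + 1) L 1 := by
    rw [PySem.List.pyRange_one_append 0 i L h0i (le_of_lt hiL),
      PySem.List.pyRange_one_cons hiL]
  have hany : ((PySem.List.pyRange 0 L 1).any fun j => decide (j < i) && (c j == c i))
      = (PySem.List.pyRange 0 i 1).any (fun j => c j == c i) := by
    rw [hsplit, List.any_append, List.any_cons]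
    have h1 : (decide (i < i) && (c i == c i)) = false := by simp
    have h2 : ((PySem.List.pyRange (i + 1) L 1).any fun j => decide (j < i) && (c j == c i))
        = false := by
      rw [List.any_eq_false]
      intro j hj
      have := ((PySem.List.mem_pyRange_one).mp hj).1
      simp [show ¬ (j < i) by omega]
    rw [h1, h2, Bool.false_or, Bool.or_false]
    refine any_congr_mem _ _ _ ?_
    intro j hj
    have := ((PySem.List.mem_pyRange_one).mp hj).2
    simp [this]
  have hfilter : (PySem.List.pyRange 0 L 1).filter (fun j => c j == c i)
      = (PySem.List.pyRange 0 i 1).filter (fun j => c j == c i)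
        ++ i :: (PySem.List.pyRange (i + 1) L 1).filter (fun j => c j == c i) := by
    rw [hsplit, List.filter_append, List.filter_cons_of_pos (by simp)]
  rw [hany, hfilter]
  by_cases hA : (PySem.List.pyRange 0 i 1).any (fun j => c j == c i)
  · rw [if_pos hA, if_pos hA]
  · have hA' : (PySem.List.pyRange 0 i 1).any (fun j => c j == c i) = false := by
      simpa using hA
    rw [if_neg (by simp [hA']), if_neg (by simp [hA'])]
    have hpre : List.filter (fun j => c j == c i) (PySem.List.pyRange 0 i 1) = [] := by
      refine List.filter_eq_nil_iff.mpr ?_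
      intro j hj
      have := (List.any_eq_false.mp hA') j hj
      simpa using this
    rw [hpre, List.nil_append]

/-- Both ports, with the n-gram map abstracted: A's dict grouping equals B's nested scan. -/
theorem ABeq {κ : Type} [BEq κ] [LawfulBEq κ] (c : Int → κ) (L : Int) :
    (((PySem.List.pyRange 0 L 1).foldl
        (fun d i => d.modify (c i) [] (fun l => l ++ [i])) PySem.Dict.empty).values.foldl
      (fun dists pos =>
        (pos.zip (PySem.List.slice pos (some 1) none)).foldl
          (fun ds ab => ds ++ [ab.2 - ab.1]) dists)
      [])
    = (PySem.List.pyRange 0 L 1).foldl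
        (fun dists i =>
          if (PySem.List.pyRange 0 i 1).any (fun j => c j == c i) then dists
          else ((PySem.List.pyRange (i + 1) L 1).foldl
            (fun (st : List Int × Int) j => if c j == c i then (st.1 ++ [j - st.2], j) else st)
            (dists, i)).1)
        [] := by
  set idxs := PySem.List.pyRange 0 L 1 with hidxs
  set dA := idxs.foldl (fun d i => d.modify (c i) [] (fun l => l ++ [i])) PySem.Dict.empty with hdA
  -- A's second loop flattens consecutive differences of every stored position list
  have hA : dA.values.foldl
      (fun dists pos =>
        (pos.zip (PySem.List.slice pos (some 1) none)).foldl
          (fun ds ab => ds ++ [ab.2 - ab.1]) dists)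
      [] = dA.values.flatMap zdiffs := by
    have hbody : (fun dists pos =>
        (pos.zip (PySem.List.slice pos (some 1) none)).foldl
          (fun ds ab => ds ++ [ab.2 - ab.1]) dists)
        = fun (dists : List Int) (pos : List Int) => dists ++ zdiffs pos := by
      funext dists pos
      rw [PySem.List.slice_from_one,
        PySem.List.foldl_append_singleton_eq_map (fun ab : Int × Int => ab.2 - ab.1)
          (pos.zip pos.tail) dists,
        zdiffs_eq_zip_tail]
    rw [hbody, PySem.List.foldl_append_eq_flatMap zdiffs dA.values [], List.nil_append]
  -- A's dict: keys are the distinct n-grams in first-appearance order, values the positions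
  have hKA : dA.keys = PySem.Set.ofList (idxs.map c) := by
    rw [hdA, PySem.Dict.keys_foldl_modify_key]
    simp [PySem.Dict.keys_empty, PySem.Set.update_nil_left]
  have hndA : dA.keys.Nodup := by
    rw [hKA]; exact PySem.Set.nodup_ofList _
  rw [hA, PySem.Dict.values_eq_map_keys dA hndA [], hKA, List.flatMap_map]
  have hAgroups : (PySem.Set.ofList (idxs.map c)).flatMap (fun k => zdiffs (dA.getD k []))
      = (PySem.Set.ofList (idxs.map c)).flatMap
          (fun k => zdiffs (idxs.filter (fun j => c j == k))) := by
    refine List.flatMap_congr ?_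
    intro k _
    rw [hdA, foldA_getD c idxs k]
  rw [hAgroups]
  -- B's loop: rewrite the body to an append, then flatten
  have hbodyB : (fun dists i =>
      if (PySem.List.pyRange 0 i 1).any (fun j => c j == c i) then dists
      else ((PySem.List.pyRange (i + 1) L 1).foldl
        (fun (st : List Int × Int) j => if c j == c i then (st.1 ++ [j - st.2], j) else st)
        (dists, i)).1)
      = fun (dists : List Int) (i : Int) => dists ++
          (if (PySem.List.pyRange 0 i 1).any (fun j => c j == c i) then []
            else zdiffs (i :: (PySem.List.pyRange (i + 1) L 1).filter (fun j => c j == c i))) := by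
    funext dists i
    by_cases h : (PySem.List.pyRange 0 i 1).any (fun j => c j == c i)
    · rw [if_pos h, if_pos h, List.append_nil]
    · rw [if_neg h, if_neg h, innerB]
  rw [hbodyB, PySem.List.foldl_append_eq_flatMap _ idxs [], List.nil_append]
  have hFb : idxs.flatMap (fun i =>
      if (PySem.List.pyRange 0 i 1).any (fun j => c j == c i) then []
      else zdiffs (i :: (PySem.List.pyRange (i + 1) L 1).filter (fun j => c j == c i)))
      = idxs.flatMap (fun i =>
          if idxs.any (fun j => decide (j < i) && (c j == c i)) then []
          else zdiffs (idxs.filter (fun j => c j == c i))) := by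
    refine List.flatMap_congr ?_
    intro i hi
    exact FbF c L i hi
  rw [hFb, mainB c idxs.length idxs (le_refl _) (by rw [hidxs]; exact PySem.List.pairwise_lt_pyRange_one 0 L)]
  simp [List.flatMap_def]

theorem kasiski_distances_eq (text : String) (n : Int) :
    kasiski_distances text n = kasiski_distances_alt text n := by
  unfold kasiski_distances kasiski_distances_alt
  exact ABeq (fun i => PySem.List.slice text.toList (some i) (some (i + n)))
    ((text.toList.length : Int) - n + 1)

-- ===== VERDICT (by name: the statement is the Claim_ definition above) =====
theorem kasiski_distances_spec : Claim_equal_kasiski_distances := by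
  intro text n _
  unfold Spec_kasiski_distances
  exact kasiski_distances_eq text n
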